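-- pv_equiv track=rewrite | github.com/radam9/codewars | python/5kyu/Play_with_two_Strings.py | work_on_strings
-- ===== SOURCE A (Python) =====
-- def work_on_strings(a, b):
--     new_a = [
--         letter if b.lower().count(letter.lower()) % 2 == 0 else letter.swapcase()
--         for letter in a
--     ]
--     new_b = [
--         letter if a.lower().count(letter.lower()) % 2 == 0 else letter.swapcase()
--         for letter in b
--     ]
--     return "".join(new_a + new_b)
-- ===== SOURCE B (Python) =====
-- def work_on_strings(a, b):
--     def parity(s):
--         odd = set()
--         for ch in s:
--             c = ch.lower()
--             if c in odd:
--                 odd.discard(c)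
--             else:
--                 odd.add(c)
--         return odd
--
--     pa = parity(a)
--     pb = parity(b)
--     new_a = [ch.swapcase() if ch.lower() in pb else ch for ch in a]
--     new_b = [ch.swapcase() if ch.lower() in pa else ch for ch in b]
--     return "".join(new_a + new_b)
-- ===== Notes on version B (the rewrite author's own statement) =====
-- stated objective: faster
-- what changed: Replaces per-letter count()%2 scans of the other string (quadratic) with one toggle pass per string that maintains a set of lowercased characters seen an odd number of times, then each output character tests membership in that parity set.
import Mathlib
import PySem

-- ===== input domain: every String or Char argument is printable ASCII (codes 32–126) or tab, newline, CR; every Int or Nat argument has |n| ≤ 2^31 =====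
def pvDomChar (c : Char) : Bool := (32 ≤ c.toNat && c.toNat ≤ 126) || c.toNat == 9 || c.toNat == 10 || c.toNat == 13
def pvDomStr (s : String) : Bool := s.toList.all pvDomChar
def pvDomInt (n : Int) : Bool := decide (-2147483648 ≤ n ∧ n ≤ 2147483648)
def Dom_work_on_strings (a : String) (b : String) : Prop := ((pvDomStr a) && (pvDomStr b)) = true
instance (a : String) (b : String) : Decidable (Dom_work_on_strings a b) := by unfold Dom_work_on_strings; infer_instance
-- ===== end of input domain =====

-- B replaces A's per-letter count()%2 scans of the other string with a single toggle pass
-- maintaining an odd-parity set per string (objective: faster).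

-- ===== PORT A =====
-- Python's c.swapcase() on a single character (ASCII; both Pythons use .swapcase())
def pvSwapChar (c : Char) : Char :=
  if PySem.Chars.isupper c then PySem.Chars.lowerChar c
  else if PySem.Chars.islower c then PySem.Chars.upperChar c
  else c

def work_on_strings (a : String) (b : String) : String :=
  let new_a := a.toList.map (fun letter =>
    if PySem.Chars.count (PySem.Chars.lower b.toList) [PySem.Chars.lowerChar letter] % 2 == 0
    then letter else pvSwapChar letter)
  let new_b := b.toList.map (fun letter =>
    if PySem.Chars.count (PySem.Chars.lower a.toList) [PySem.Chars.lowerChar letter] % 2 == 0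
    then letter else pvSwapChar letter)
  String.ofList (new_a ++ new_b)

-- ===== PORT B =====
-- toggle pass: after it the set holds exactly the lowercased chars occurring an odd number of times
def pvParity (s : List Char) : PySem.Set Char :=
  s.foldl (fun odd ch =>
    let c := PySem.Chars.lowerChar ch
    if PySem.Set.contains odd c then PySem.Set.discard odd c else PySem.Set.add odd c)
    PySem.Set.empty

def work_on_strings_alt (a : String) (b : String) : String :=
  let pa := pvParity a.toList
  let pb := pvParity b.toList
  let new_a := a.toList.map (fun ch =>
    if PySem.Set.contains pb (PySem.Chars.lowerChar ch) then pvSwapChar ch else ch)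
  let new_b := b.toList.map (fun ch =>
    if PySem.Set.contains pa (PySem.Chars.lowerChar ch) then pvSwapChar ch else ch)
  String.ofList (new_a ++ new_b)

-- ===== PRECONDITION & SPEC =====
def Spec_work_on_strings (a : String) (b : String) (out : String) : Prop := out = work_on_strings_alt a b
instance (a : String) (b : String) (out : String) : Decidable (Spec_work_on_strings a b out) := by unfold Spec_work_on_strings; infer_instance

-- ===== CLAIM (what is proved, stated in full; the proofs are below) =====
def Claim_equal_work_on_strings : Prop := ∀ (a : String) (b : String), Dom_work_on_strings a b → Spec_work_on_strings a b (work_on_strings a b)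

-- ===== LEMMAS AND PROOFS =====

-- Chars.count with a singleton pattern is element count
theorem pv_count_go_singleton (c : Char) (l : List Char) (fuel acc : Nat)
    (h : l.length ≤ fuel) :
    PySem.Chars.count.go [c] fuel l acc = acc + l.count c := by
  induction l generalizing fuel acc with
  | nil => cases fuel <;> simp [PySem.Chars.count.go]
  | cons x t ih =>
    cases fuel with
    | zero => simp at h
    | succ f =>
      simp only [List.length_cons, Nat.succ_le_succ_iff] at h
      by_cases hx : x = c
      · subst hx
        simp [PySem.Chars.count.go, List.isPrefixOf, ih _ _ h]
        omega
      · simp [PySem.Chars.count.go, List.isPrefixOf, hx, ih _ _ h, Ne.symm hx]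

theorem pv_count_singleton (cs : List Char) (c : Char) :
    PySem.Chars.count cs [c] = cs.count c := by
  simp [PySem.Chars.count, pv_count_go_singleton c cs cs.length 0 le_rfl]

-- the toggle-pass invariant: membership in the accumulated set is parity of the count
theorem pv_parity_mem (cs : List Char) (st : PySem.Set Char) (x : Char) :
    (x ∈ cs.foldl (fun odd ch =>
        let c := PySem.Chars.lowerChar ch
        if PySem.Set.contains odd c then PySem.Set.discard odd c else PySem.Set.add odd c) st)
    ↔ ((x ∈ st) ↔ (cs.map PySem.Chars.lowerChar).count x % 2 = 0) := by
  induction cs generalizing st with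
  | nil => simp
  | cons ch t ih =>
    simp only [List.foldl_cons, List.map_cons]
    rw [ih]
    by_cases hmem : PySem.Chars.lowerChar ch ∈ st
    · have hc : PySem.Set.contains st (PySem.Chars.lowerChar ch) = true :=
        (PySem.Set.contains_iff st _).mpr hmem
      simp only [hc, if_true, PySem.Set.mem_discard]
      by_cases hx : x = PySem.Chars.lowerChar ch
      · subst hx
        simp [hmem]
        omega
      · have hne : PySem.Chars.lowerChar ch ≠ x := fun h => hx h.symm
        simp [hne, hx]
    · have hc : PySem.Set.contains st (PySem.Chars.lowerChar ch) = false := by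
        by_contra h
        exact hmem ((PySem.Set.contains_iff st _).mp (by simpa using h))
      simp only [hc, Bool.false_eq_true, if_false]
      by_cases hx : x = PySem.Chars.lowerChar ch
      · subst hx
        simp [hmem]
        omega
      · have hne : PySem.Chars.lowerChar ch ≠ x := fun h => hx h.symm
        simp [hne, hx]

theorem pv_parity_contains (s : List Char) (x : Char) :
    PySem.Set.contains (pvParity s) x
      = !((s.map PySem.Chars.lowerChar).count x % 2 == 0) := by
  rcases h : PySem.Set.contains (pvParity s) x with _ | _
  · have hmem : x ∉ pvParity s := by
      intro hm
      rw [(PySem.Set.contains_iff _ _).mpr hm] at h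
      exact Bool.false_ne_true h.symm
    rw [pvParity] at hmem
    rw [pv_parity_mem] at hmem
    simp only [PySem.Set.empty] at hmem
    simp only [List.not_mem_nil] at hmem
    have : (s.map PySem.Chars.lowerChar).count x % 2 = 0 := by tauto
    simp [this]
  · have hmem : x ∈ pvParity s := (PySem.Set.contains_iff _ _).mp h
    rw [pvParity, pv_parity_mem] at hmem
    simp only [PySem.Set.empty, List.not_mem_nil] at hmem
    have : ¬ (s.map PySem.Chars.lowerChar).count x % 2 = 0 := by tauto
    simp [Nat.mod_two_ne_zero.mp this]

-- per-character agreement of the two transforms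
theorem pv_char_eq (other : List Char) (ch : Char) :
    (if PySem.Chars.count (PySem.Chars.lower other) [PySem.Chars.lowerChar ch] % 2 == 0
     then ch else pvSwapChar ch)
    = (if PySem.Set.contains (pvParity other) (PySem.Chars.lowerChar ch)
       then pvSwapChar ch else ch) := by
  rw [pv_count_singleton, pv_parity_contains, PySem.Chars.lower]
  rcases h : ((other.map PySem.Chars.lowerChar).count (PySem.Chars.lowerChar ch) % 2 == 0) with _ | _
  <;> simp

-- ===== VERDICT (by name: the statement is the Claim_ definition above) =====
theorem work_on_strings_spec : Claim_equal_work_on_strings := by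
  intro a b _
  unfold Spec_work_on_strings work_on_strings work_on_strings_alt
  simp only
  rw [List.map_congr_left (fun ch _ => pv_char_eq b.toList ch),
    List.map_congr_left (fun ch _ => pv_char_eq a.toList ch)]
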